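-- pv_equiv track=rewrite | github.com/cluster2600/ALBATOR | report.py | _nist_families_from_rules
-- ===== SOURCE A (Python) =====
-- def _nist_families_from_rules(rules):
--     """Extract NIST 800-53r5 family coverage from loaded rules."""
--     families = {}  # family_code -> set of controls
--     for rule in rules:
--         refs = rule.get("references", {})
--         for ctrl in refs.get("800-53r5", []):
--             family = ctrl.split("-")[0]
--             families.setdefault(family, set()).add(ctrl)
--     return families
-- ===== SOURCE B (Python) =====
-- def _nist_families_from_rules(rules):
--     """Extract NIST 800-53r5 family coverage from loaded rules."""
--     pairs = [(ctrl.split("-")[0], ctrl)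
--              for rule in rules
--              for ctrl in rule.get("references", {}).get("800-53r5", [])]
--     order = list(dict.fromkeys(fam for fam, _ in pairs))
--     return {fam: {c for f, c in pairs if f == fam} for fam in order}
-- ===== Notes on version B (the rewrite author's own statement) =====
-- stated objective: alternative
-- what changed: Replaces the incremental dict-of-sets accumulation (setdefault+add inside nested loops) by a flat list of (family, control) pairs, an ordered dedup of the family codes, and a per-family set comprehension over the flat list.
import Mathlib
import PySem

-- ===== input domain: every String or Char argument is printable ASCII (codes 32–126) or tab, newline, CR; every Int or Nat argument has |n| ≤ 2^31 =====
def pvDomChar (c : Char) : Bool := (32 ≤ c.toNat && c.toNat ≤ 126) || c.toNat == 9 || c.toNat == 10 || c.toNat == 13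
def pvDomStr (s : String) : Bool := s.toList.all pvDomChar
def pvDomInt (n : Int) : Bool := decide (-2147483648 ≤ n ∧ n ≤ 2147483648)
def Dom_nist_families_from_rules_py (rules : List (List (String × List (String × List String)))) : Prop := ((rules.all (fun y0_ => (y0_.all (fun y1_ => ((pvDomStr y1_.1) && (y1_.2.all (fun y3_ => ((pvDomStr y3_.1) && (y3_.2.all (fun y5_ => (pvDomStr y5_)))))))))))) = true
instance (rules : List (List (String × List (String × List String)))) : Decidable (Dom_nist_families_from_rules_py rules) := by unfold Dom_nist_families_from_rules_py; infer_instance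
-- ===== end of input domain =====

-- B replaces A's incremental dict-of-sets accumulation by a flat (family, ctrl) pair list, an ordered dedup of family codes, and per-family set comprehensions (alternative decomposition, same behaviour).


-- ===== PORT A =====
def pvFam (ctrl : String) : String :=
  -- ctrl.split("-")[0]; split with a nonempty separator always returns at least one piece,
  -- so the [0] index never raises and the "" default is unreachable
  (((PySem.Str.split? ctrl "-").getD []).headD "")

-- rule.get(key, default) on an association-list dict: first match, per the type convention
def pvGetRefs (rule : List (String × List (String × List String))) : List (String × List String) :=
  (rule.lookup "references").getD []

def pvGetCtrls (refs : List (String × List String)) : List String :=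
  (refs.lookup "800-53r5").getD []

def nist_families_from_rules_py (rules : List (List (String × List (String × List String)))) : List (String × List String) :=
  -- families = {}; for rule: for ctrl in rule.get("references",{}).get("800-53r5",[]):
  --   families.setdefault(family, set()).add(ctrl)
  (rules.foldl (fun families rule =>
      (pvGetCtrls (pvGetRefs rule)).foldl (fun families ctrl =>
        families.modify (pvFam ctrl) PySem.Set.empty (fun s => PySem.Set.add s ctrl)) families)
    PySem.Dict.empty).items

-- ===== PORT B =====
-- the flat [(family, ctrl), ...] pair list of Source B
def pvPairs (rules : List (List (String × List (String × List String)))) : List (String × String) :=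
  rules.flatMap (fun rule =>
    (pvGetCtrls (pvGetRefs rule)).map (fun ctrl => (pvFam ctrl, ctrl)))

def nist_families_from_rules_py_alt (rules : List (List (String × List (String × List String)))) : List (String × List String) :=
  (PySem.List.dedup ((pvPairs rules).map (·.1))).map
    (fun fam => (fam, PySem.Set.ofList (((pvPairs rules).filter (fun p => p.1 == fam)).map (·.2))))

-- ===== PRECONDITION & SPEC =====
def Spec_nist_families_from_rules_py (rules : List (List (String × List (String × List String)))) (out : List (String × List String)) : Prop := out = nist_families_from_rules_py_alt rules
instance (rules : List (List (String × List (String × List String)))) (out : List (String × List String)) : Decidable (Spec_nist_families_from_rules_py rules out) := by unfold Spec_nist_families_from_rules_py; infer_instance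

-- ===== CLAIM (what is proved, stated in full; the proofs are below) =====
def Claim_equal_nist_families_from_rules_py : Prop := ∀ (rules : List (List (String × List (String × List String)))), Dom_nist_families_from_rules_py rules → Spec_nist_families_from_rules_py rules (nist_families_from_rules_py rules)

-- ===== LEMMAS AND PROOFS =====

-- A's inner loop as a fold over the flat (family, ctrl) pair list
def pvStep (d : PySem.Dict String (PySem.Set String)) (p : String × String) :
    PySem.Dict String (PySem.Set String) :=
  d.modify p.1 PySem.Set.empty (fun s => PySem.Set.add s p.2)

lemma pv_foldl_flatMap {α β : Type} (f : α → List β)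
    (g : PySem.Dict String (PySem.Set String) → β → PySem.Dict String (PySem.Set String))
    (l : List α) (d : PySem.Dict String (PySem.Set String)) :
    (l.flatMap f).foldl g d = l.foldl (fun d x => (f x).foldl g d) d := by
  induction l generalizing d with
  | nil => rfl
  | cons a t ih => simp [List.flatMap_cons, List.foldl_append, ih]

lemma pv_getD_fold_add (l : List (String × String)) (d : PySem.Dict String (PySem.Set String))
    (c : String) :
    (l.foldl pvStep d).getD c [] =
      ((l.filter (fun p => p.1 == c)).map (·.2)).foldl PySem.Set.add (d.getD c []) := by
  induction l generalizing d with
  | nil => rfl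
  | cons p t ih =>
    simp only [List.foldl_cons, List.filter_cons]
    by_cases h : p.1 = c
    · simp [h, ih, pvStep]
    · have hb : (p.1 == c) = false := by simp [h]
      simp [hb, ih, pvStep, PySem.Dict.getD_modify, Ne.symm h]

lemma pv_items_fold (pairs : List (String × String)) :
    (pairs.foldl pvStep PySem.Dict.empty).items =
      (PySem.List.dedup (pairs.map (·.1))).map
        (fun fam => (fam, PySem.Set.ofList ((pairs.filter (fun p => p.1 == fam)).map (·.2)))) := by
  have hnd : (pairs.foldl pvStep PySem.Dict.empty).keys.Nodup := by
    have := PySem.Dict.nodup_keys_foldl_modify_key pairs (fun p : String × String => p.1)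
      PySem.Set.empty (fun _ p => fun s => PySem.Set.add s p.2) PySem.Dict.empty
      (by simp)
    simpa [pvStep] using this
  have hkeys : (pairs.foldl pvStep PySem.Dict.empty).keys =
      PySem.List.dedup (pairs.map (·.1)) := by
    have := PySem.Dict.keys_foldl_modify_key pairs (fun p : String × String => p.1)
      PySem.Set.empty (fun _ p => fun s => PySem.Set.add s p.2) PySem.Dict.empty
    simpa [pvStep, PySem.List.dedup_eq_ofList, PySem.Set.update_nil_left] using this
  rw [PySem.Dict.items_eq_map_keys _ hnd ([] : PySem.Set String), hkeys]
  refine List.map_congr_left (fun fam _ => ?_)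
  rw [pv_getD_fold_add, PySem.Dict.getD_empty, PySem.Set.ofList_eq_foldl]

-- ===== VERDICT (by name: the statement is the Claim_ definition above) =====
theorem nist_families_from_rules_py_spec : Claim_equal_nist_families_from_rules_py := by
  intro rules _
  unfold Spec_nist_families_from_rules_py nist_families_from_rules_py nist_families_from_rules_py_alt
  have h : ∀ (rule : List (String × List (String × List String)))
      (d : PySem.Dict String (PySem.Set String)),
      ((pvGetCtrls (pvGetRefs rule)).map (fun ctrl => (pvFam ctrl, ctrl))).foldl pvStep d =
      (pvGetCtrls (pvGetRefs rule)).foldl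
        (fun families ctrl =>
          families.modify (pvFam ctrl) PySem.Set.empty (fun s => PySem.Set.add s ctrl)) d := by
    intro rule d
    rw [List.foldl_map]
    rfl
  simp only [← h]
  rw [← pv_foldl_flatMap, ← pvPairs, pv_items_fold]
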